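-- pv_equiv track=rewrite | github.com/MrBrantCode/unitest_baseline | mut_generate/mist_train_taco/taco_1076/solution.py | find_spoon_in_matrix
-- ===== SOURCE A (Python) =====
-- def find_spoon_in_matrix(test_cases):
--     results = []
--
--     for case in test_cases:
--         R, C, matrix = case
--         matrix = [row.lower() for row in matrix]
--         found = False
--
--         # Check rows for "spoon"
--         for row in matrix:
--             if 'spoon' in row:
--                 found = True
--                 break
--
--         # If not found in rows, check columns for "spoon"
--         if not found:
--             for col in range(C):
--                 for row in range(R - 4):
--                     if (matrix[row][col] == 's' and
--                         matrix[row + 1][col] == 'p' and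
--                         matrix[row + 2][col] == 'o' and
--                         matrix[row + 3][col] == 'o' and
--                         matrix[row + 4][col] == 'n'):
--                         found = True
--                         break
--                 if found:
--                     break
--
--         if found:
--             results.append("There is a spoon!")
--         else:
--             results.append("There is indeed no spoon!")
--
--     return results
-- ===== SOURCE B (Python) =====
-- def find_spoon_in_matrix(test_cases):
--     results = []
--     for R, C, matrix in test_cases:
--         rows = [row.lower() for row in matrix]
--         found = any('spoon' in row for row in rows)
--         if not found and R >= 5:
--             # a vertical "spoon" needs at least 5 rows: test the declared grid's column strings
--             found = any('spoon' in ''.join(rows[r][c] for r in range(R)) for c in range(C))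
--         results.append("There is a spoon!" if found else "There is indeed no spoon!")
--     return results
-- ===== Notes on version B (the rewrite author's own statement) =====
-- stated objective: simpler
-- what changed: Replaces A's explicit 5-character vertical window comparison loop with building the declared grid's column strings and reusing the same 'spoon' in line substring test for columns as for rows (columns only attempted when no row matched and R >= 5, since a vertical spoon needs 5 rows).
-- outside the precondition, e.g. on find_spoon_in_matrix([(6, 1, ['s', 'p', 'o', 'o', 'n', ''])]): A returns ['There is a spoon!'], B raises IndexError
import Mathlib
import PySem

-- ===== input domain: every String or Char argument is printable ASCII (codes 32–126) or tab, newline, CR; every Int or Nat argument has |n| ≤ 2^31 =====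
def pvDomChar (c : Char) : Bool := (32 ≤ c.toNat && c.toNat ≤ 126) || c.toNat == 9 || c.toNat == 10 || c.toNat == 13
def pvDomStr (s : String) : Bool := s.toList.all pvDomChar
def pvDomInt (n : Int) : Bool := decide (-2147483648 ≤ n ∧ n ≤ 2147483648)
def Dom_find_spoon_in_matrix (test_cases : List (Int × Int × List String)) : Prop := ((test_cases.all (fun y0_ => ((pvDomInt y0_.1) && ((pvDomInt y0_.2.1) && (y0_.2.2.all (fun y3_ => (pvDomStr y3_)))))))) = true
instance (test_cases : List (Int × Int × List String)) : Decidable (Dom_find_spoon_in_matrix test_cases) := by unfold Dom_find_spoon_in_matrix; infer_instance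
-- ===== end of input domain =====

-- B replaces A's explicit 5-character vertical window scan with building the declared R×C grid's column
-- strings and one unified substring test over rows + columns (objective: simpler; return value only).

-- ===== PORT A =====
-- matrix[r][c], Python-exact on both indexings (none = IndexError)
def pvCharAt (matrix : List String) (r c : Int) : Option Char :=
  match PySem.List.pyGet? matrix r with
  | some row => PySem.Str.pyGet? row c
  | none => none

-- one iteration of A's `for case in test_cases` body (the break-driven searches are the `any`s)
def pvCaseA (case : Int × Int × List String) : String :=
  let R := case.1
  let C := case.2.1
  let matrix := case.2.2.map PySem.Str.lower
  let found :=
    if matrix.any (fun row => PySem.Str.isIn "spoon" row) then true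
    else
      (PySem.List.pyRange 0 C 1).any (fun col =>
        (PySem.List.pyRange 0 (R - 4) 1).any (fun row =>
          (pvCharAt matrix row col == some 's') &&
          (pvCharAt matrix (row + 1) col == some 'p') &&
          (pvCharAt matrix (row + 2) col == some 'o') &&
          (pvCharAt matrix (row + 3) col == some 'o') &&
          (pvCharAt matrix (row + 4) col == some 'n')))
  if found then "There is a spoon!" else "There is indeed no spoon!"

def find_spoon_in_matrix (test_cases : List (Int × Int × List String)) : List String :=
  test_cases.foldl (fun results case => results ++ [pvCaseA case]) []

-- ===== PORT B =====
-- rows[r][c] inside B's column builder; ' ' is a total stand-in exactly where Python raises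
-- IndexError (such inputs are excluded by Pre_ below)
def pvColChar (rows : List (List Char)) (r c : Int) : Char :=
  (match PySem.List.pyGet? rows r with
   | some row => PySem.List.pyGet? row c
   | none => none).getD ' '

-- one iteration of B's loop: rows first, then (only if needed and R >= 5) the declared grid's
-- column strings, each tested with the same substring check
def pvCaseB (case : Int × Int × List String) : String :=
  let R := case.1
  let C := case.2.1
  let rows := case.2.2.map (fun row => PySem.Chars.lower row.toList)
  let foundRows := rows.any (fun line => PySem.Chars.isIn "spoon".toList line)
  let found :=
    if !foundRows && decide (5 ≤ R) then
      (PySem.List.pyRange 0 C 1).any (fun c =>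
        PySem.Chars.isIn "spoon".toList
          ((PySem.List.pyRange 0 R 1).map (fun r => pvColChar rows r c)))
    else foundRows
  if found then "There is a spoon!" else "There is indeed no spoon!"

def find_spoon_in_matrix_alt (test_cases : List (Int × Int × List String)) : List String :=
  test_cases.map pvCaseB

-- ===== PRECONDITION & SPEC =====
-- Pre_ excludes cases where a vertical scan is due (no 'spoon' in a row, R >= 5, C >= 1) but the
-- declared R×C grid sticks out of the actual matrix: there A raises IndexError, or returns only
-- because its lazy scan stops before the overflow, while B's eager column build raises IndexError.
def Pre_find_spoon_in_matrix (test_cases : List (Int × Int × List String)) : Prop :=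
  ∀ case ∈ test_cases, 4 < case.1 → 0 < case.2.1 →
    (case.1 ≤ (case.2.2.length : Int) ∧
      ∀ row ∈ case.2.2.take case.1.toNat, case.2.1 ≤ (row.toList.length : Int)) ∨
    (∃ row ∈ case.2.2, PySem.Chars.isIn "spoon".toList (PySem.Chars.lower row.toList) = true)

instance (test_cases : List (Int × Int × List String)) : Decidable (Pre_find_spoon_in_matrix test_cases) := by
  unfold Pre_find_spoon_in_matrix; infer_instance

def pvWitness_find_spoon_in_matrix : (List (Int × Int × List String)) :=
  [(2, 3, ["Spo", "onx"]), (5, 1, ["s", "p", "o", "o", "n"])]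

def Spec_find_spoon_in_matrix (test_cases : List (Int × Int × List String)) (out : List String) : Prop := out = find_spoon_in_matrix_alt test_cases
instance (test_cases : List (Int × Int × List String)) (out : List String) : Decidable (Spec_find_spoon_in_matrix test_cases out) := by unfold Spec_find_spoon_in_matrix; infer_instance

-- ===== CLAIM (what is proved, stated in full; the proofs are below) =====
def Claim_equal_find_spoon_in_matrix : Prop := ∀ (test_cases : List (Int × Int × List String)), Dom_find_spoon_in_matrix test_cases → Pre_find_spoon_in_matrix test_cases → Spec_find_spoon_in_matrix test_cases (find_spoon_in_matrix test_cases)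

-- ===== LEMMAS AND PROOFS =====

lemma pyRange_nonpos {C : Int} (h : C ≤ 0) : PySem.List.pyRange 0 C 1 = [] := by
  refine List.eq_nil_iff_forall_not_mem.mpr fun x hx => ?_
  have := PySem.List.mem_pyRange_one.mp hx
  omega

lemma spoon_prefix_iff (l : List Char) :
    "spoon".toList <+: l ↔
      (l[0]? = some 's' ∧ l[1]? = some 'p' ∧ l[2]? = some 'o' ∧ l[3]? = some 'o' ∧ l[4]? = some 'n') := by
  have h : "spoon".toList = ['s', 'p', 'o', 'o', 'n'] := rfl
  rw [h]
  rcases l with _ | ⟨a, _ | ⟨b, _ | ⟨c, _ | ⟨d, _ | ⟨e, t⟩⟩⟩⟩⟩ <;>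
    simp [List.cons_prefix_cons, @eq_comm Char]

lemma charAt_colChar (m : List String) (k c : Nat)
    (hk : k < m.length) (hc : c < m[k].toList.length) (ch : Char) :
    pvCharAt m (k : Int) (c : Int) = some ch ↔
      pvColChar (m.map String.toList) (k : Int) (c : Int) = ch := by
  unfold pvCharAt pvColChar
  rw [PySem.List.pyGet?_natCast, PySem.List.pyGet?_natCast]
  simp [List.getElem?_map, List.getElem?_eq_getElem hk, List.getElem?_eq_getElem hc]

lemma col_getElem (rows : List (List Char)) (R c : Int) (hR : 0 < R) (j : Nat) :
    ((PySem.List.pyRange 0 R 1).map (fun r => pvColChar rows r c))[j]? =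
      if j < R.toNat then some (pvColChar rows (j : Int) c) else none := by
  conv_lhs => rw [show R = ((R.toNat : Nat) : Int) from (Int.toNat_of_nonneg hR.le).symm]
  rw [PySem.List.pyRange_zero_natCast, List.map_map, List.getElem?_map]
  by_cases hj : j < R.toNat
  · rw [List.getElem?_range hj]
    simp [hj]
  · rw [List.getElem?_eq_none (by simpa using Nat.le_of_not_lt hj)]
    simp [hj]

lemma vertical_eq (m : List String) (R C : Int) (hR : 0 < R)
    (hlen : R ≤ (m.length : Int))
    (hwid : ∀ row ∈ m.take R.toNat, C ≤ (row.toList.length : Int)) :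
    ((PySem.List.pyRange 0 C 1).any (fun col =>
        (PySem.List.pyRange 0 (R - 4) 1).any (fun row =>
          (pvCharAt m row col == some 's') &&
          (pvCharAt m (row + 1) col == some 'p') &&
          (pvCharAt m (row + 2) col == some 'o') &&
          (pvCharAt m (row + 3) col == some 'o') &&
          (pvCharAt m (row + 4) col == some 'n'))))
      = ((PySem.List.pyRange 0 C 1).any (fun c =>
          PySem.Chars.isIn "spoon".toList
            ((PySem.List.pyRange 0 R 1).map (fun r => pvColChar (m.map String.toList) r c)))) := by
  rw [Bool.eq_iff_iff]
  simp only [List.any_eq_true, PySem.List.mem_pyRange_one, Bool.and_eq_true, beq_iff_eq,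
    ← PySem.Chars.exists_prefix_drop_iff_isIn, spoon_prefix_iff,
    List.getElem?_drop, Nat.add_zero]
  constructor
  · rintro ⟨col, ⟨hc0, hcC⟩, row, ⟨hr0, hrR⟩, ⟨⟨⟨⟨h1, h2⟩, h3⟩, h4⟩, h5⟩⟩
    obtain ⟨c, rfl⟩ : ∃ c : Nat, (c : Int) = col := ⟨col.toNat, Int.toNat_of_nonneg hc0⟩
    obtain ⟨j, rfl⟩ : ∃ j : Nat, (j : Int) = row := ⟨row.toNat, Int.toNat_of_nonneg hr0⟩
    have key : ∀ i : Nat, i ≤ 4 → ∀ ch : Char, pvCharAt m ((j + i : Nat) : Int) (c : Int) = some ch →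
        ((PySem.List.pyRange 0 R 1).map (fun r => pvColChar (m.map String.toList) r (c : Int)))[j + i]?
          = some ch := by
      intro i hi ch hch
      have hjR : j + i < R.toNat := by omega
      have hk : j + i < m.length := by omega
      have hmem : m[j + i] ∈ m.take R.toNat := by
        have ht : j + i < (m.take R.toNat).length := by
          simp
          omega
        rw [← List.getElem_take (h := ht)]
        exact List.getElem_mem _
      have hc : c < m[j + i].toList.length := by
        have := hwid _ hmem
        omega
      rw [col_getElem _ _ _ hR, if_pos hjR]
      exact congrArg some ((charAt_colChar m (j + i) c hk hc ch).mp hch)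
    refine ⟨(c : Int), ⟨hc0, hcC⟩, j, ?_, ?_, ?_, ?_, ?_⟩
    · simpa using key 0 (by omega) 's' (by simpa using h1)
    · exact key 1 (by omega) 'p' (by rw [show ((j + 1 : Nat) : Int) = (j : Int) + 1 by push_cast; ring]; exact h2)
    · exact key 2 (by omega) 'o' (by rw [show ((j + 2 : Nat) : Int) = (j : Int) + 2 by push_cast; ring]; exact h3)
    · exact key 3 (by omega) 'o' (by rw [show ((j + 3 : Nat) : Int) = (j : Int) + 3 by push_cast; ring]; exact h4)
    · exact key 4 (by omega) 'n' (by rw [show ((j + 4 : Nat) : Int) = (j : Int) + 4 by push_cast; ring]; exact h5)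
  · rintro ⟨col, ⟨hc0, hcC⟩, j, h1, h2, h3, h4, h5⟩
    obtain ⟨c, rfl⟩ : ∃ c : Nat, (c : Int) = col := ⟨col.toNat, Int.toNat_of_nonneg hc0⟩
    have hj4 : j + 4 < R.toNat := by
      by_contra hcon
      rw [col_getElem _ _ _ hR, if_neg hcon] at h5
      simp at h5
    have key : ∀ i : Nat, i ≤ 4 → ∀ ch : Char,
        ((PySem.List.pyRange 0 R 1).map (fun r => pvColChar (m.map String.toList) r (c : Int)))[j + i]?
          = some ch → pvCharAt m ((j + i : Nat) : Int) (c : Int) = some ch := by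
      intro i hi ch hch
      have hjR : j + i < R.toNat := by omega
      have hk : j + i < m.length := by omega
      have hmem : m[j + i] ∈ m.take R.toNat := by
        have ht : j + i < (m.take R.toNat).length := by
          simp
          omega
        rw [← List.getElem_take (h := ht)]
        exact List.getElem_mem _
      have hc : c < m[j + i].toList.length := by
        have := hwid _ hmem
        omega
      rw [col_getElem _ _ _ hR, if_pos hjR] at hch
      exact (charAt_colChar m (j + i) c hk hc ch).mpr (Option.some.inj hch)
    refine ⟨(c : Int), ⟨hc0, hcC⟩, (j : Int), ⟨by positivity, by omega⟩, ?_⟩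
    refine ⟨⟨⟨⟨by simpa using key 0 (by omega) 's' (by simpa using h1), ?_⟩, ?_⟩, ?_⟩, ?_⟩
    · rw [show (j : Int) + 1 = ((j + 1 : Nat) : Int) by push_cast; ring]
      exact key 1 (by omega) 'p' h2
    · rw [show (j : Int) + 2 = ((j + 2 : Nat) : Int) by push_cast; ring]
      exact key 2 (by omega) 'o' h3
    · rw [show (j : Int) + 3 = ((j + 3 : Nat) : Int) by push_cast; ring]
      exact key 3 (by omega) 'o' h4
    · rw [show (j : Int) + 4 = ((j + 4 : Nat) : Int) by push_cast; ring]
      exact key 4 (by omega) 'n' h5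

lemma caseA_eq_caseB (case : Int × Int × List String)
    (hpre : 4 < case.1 → 0 < case.2.1 →
      (case.1 ≤ (case.2.2.length : Int) ∧
        ∀ row ∈ case.2.2.take case.1.toNat, case.2.1 ≤ (row.toList.length : Int)) ∨
      (∃ row ∈ case.2.2, PySem.Chars.isIn "spoon".toList (PySem.Chars.lower row.toList) = true)) :
    pvCaseA case = pvCaseB case := by
  obtain ⟨R, C, matrix0⟩ := case
  simp only at hpre
  have hmap : (matrix0.map PySem.Str.lower).map String.toList
      = matrix0.map (fun r => PySem.Chars.lower r.toList) := by
    simp [List.map_map, Function.comp_def, PySem.Str.toList_lower]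
  have hrowany : (matrix0.map PySem.Str.lower).any (fun row => PySem.Str.isIn "spoon" row)
      = (matrix0.map (fun r => PySem.Chars.lower r.toList)).any
          (fun line => PySem.Chars.isIn "spoon".toList line) := by
    simp [List.any_map, Function.comp_def, PySem.Str.isIn_eq, PySem.Str.toList_lower]
  simp only [pvCaseA, pvCaseB]
  rw [hrowany]
  cases hfound : (matrix0.map (fun r => PySem.Chars.lower r.toList)).any
      (fun line => PySem.Chars.isIn "spoon".toList line) with
  | true => simp
  | false =>
    by_cases hR5 : 5 ≤ R
    · by_cases hC : 0 < C
      · -- the declared grid fits (the row-spoon disjunct contradicts hfound)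
        have hrect : R ≤ ((matrix0.map PySem.Str.lower).length : Int) ∧
            ∀ row ∈ (matrix0.map PySem.Str.lower).take R.toNat, C ≤ (row.toList.length : Int) := by
          rcases hpre (by omega) hC with h | ⟨row, hrow, hsp⟩
          · obtain ⟨h1, h2⟩ := h
            refine ⟨by simpa using h1, ?_⟩
            intro r hr
            rw [← List.map_take] at hr
            obtain ⟨r0, hr0, rfl⟩ := List.mem_map.1 hr
            rw [PySem.Str.toList_lower]
            simpa [PySem.Chars.lower] using h2 r0 hr0
          · have hany : (matrix0.map (fun r => PySem.Chars.lower r.toList)).any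
                (fun line => PySem.Chars.isIn "spoon".toList line) = true :=
              List.any_eq_true.mpr ⟨_, List.mem_map.mpr ⟨row, hrow, rfl⟩, hsp⟩
            rw [hfound] at hany
            exact absurd hany (by simp)
        have hvert := vertical_eq (matrix0.map PySem.Str.lower) R C (by omega)
          hrect.1 hrect.2
        rw [hmap] at hvert
        rw [hvert]
        simp only [Bool.not_false, Bool.true_and, decide_eq_true_eq]
        rw [if_pos hR5]
        simp
      · rw [pyRange_nonpos (by omega : C ≤ 0)]
        simp
    · have h1 : PySem.List.pyRange 0 (R - 4) 1 = [] := pyRange_nonpos (by omega)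
      have h2 : decide ((5:Int) ≤ R) = false := by simp; omega
      simp [h1, h2]

theorem find_spoon_in_matrix_spec_aux :
    ∀ (test_cases : List (Int × Int × List String)), Pre_find_spoon_in_matrix test_cases →
      find_spoon_in_matrix test_cases = find_spoon_in_matrix_alt test_cases := by
  intro tc hpre
  unfold find_spoon_in_matrix find_spoon_in_matrix_alt
  rw [PySem.List.foldl_append_singleton_eq_map]
  simp only [List.nil_append]
  exact List.map_congr_left fun case hcase => caseA_eq_caseB case (hpre case hcase)

-- ===== VERDICT (by name: the statement is the Claim_ definition above) =====
theorem find_spoon_in_matrix_spec : Claim_equal_find_spoon_in_matrix := by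
  intro tc _ hpre
  exact find_spoon_in_matrix_spec_aux tc hpre
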